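-- pv_equiv track=rewrite | github.com/pypi-data/pypi-mirror-403 | packages/bedrock-agentcore-starter-toolkit/bedrock_agentcore_starter_toolkit-0.2.8.tar.gz/bedrock_agentcore_starter_toolkit-0.2.8/src/bedrock_agentcore_starter_toolkit/operations/memory/memory_visualizer.py | _group_events_by_branch
-- ===== SOURCE A (Python) =====
-- from typing import Any, Dict, List, Optional
--
-- def _group_events_by_branch(events: List[Dict[str, Any]]) -> Dict[str, List[Dict[str, Any]]]:
--     """Group events by branch name."""
--     branches: Dict[str, List[Dict[str, Any]]] = {}
--     for event in events:
--         branch_name = event.get("branch", {}).get("name", "main")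
--         if branch_name not in branches:
--             branches[branch_name] = []
--         branches[branch_name].append(event)
--     return branches
-- ===== SOURCE B (Python) =====
-- def _group_events_by_branch(events):
--     """Group events by branch name (two-pass: dedup names, then filter per name)."""
--     def key(e):
--         return e.get("branch", {}).get("name", "main")
--     names = list(dict.fromkeys(key(e) for e in events))
--     return {name: [e for e in events if key(e) == name] for name in names}
-- ===== Notes on version B (the rewrite author's own statement) =====
-- stated objective: alternative
-- what changed: B replaces A's single-pass dict accumulation (create-bucket-then-append per event) with a two-pass scheme: dedup the branch names in first-occurrence order, then build each group by filtering the event list per name.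
import Mathlib
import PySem

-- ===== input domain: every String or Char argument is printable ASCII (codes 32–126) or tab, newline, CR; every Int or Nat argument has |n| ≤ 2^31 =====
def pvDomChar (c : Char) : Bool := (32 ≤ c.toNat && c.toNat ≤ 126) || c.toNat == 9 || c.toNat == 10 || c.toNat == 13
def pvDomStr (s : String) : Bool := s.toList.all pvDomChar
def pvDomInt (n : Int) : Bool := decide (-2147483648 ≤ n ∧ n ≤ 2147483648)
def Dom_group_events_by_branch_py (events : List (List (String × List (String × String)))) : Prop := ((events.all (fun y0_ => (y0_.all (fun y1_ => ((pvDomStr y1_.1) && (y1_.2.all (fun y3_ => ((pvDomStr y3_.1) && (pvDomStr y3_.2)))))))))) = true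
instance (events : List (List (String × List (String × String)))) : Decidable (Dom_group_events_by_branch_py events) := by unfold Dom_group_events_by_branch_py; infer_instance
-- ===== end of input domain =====

-- B is an alternative decomposition of the same grouping: dedup the branch names in first-occurrence order, then filter the events per name (A accumulates buckets in a dict in one pass); same result, no speed claim.

-- shared helper: event.get("branch", {}).get("name", "main") — the identical key expression both Pythons use
def pvBranchName (event : List (String × List (String × String))) : String :=
  PySem.Dict.getD (PySem.Dict.mk ((PySem.Dict.mk event).getD "branch" [])) "name" "main"

-- ===== PORT A =====
def group_events_by_branch_py (events : List (List (String × List (String × String)))) : List (String × List (List (String × List (String × String)))) :=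
  (events.foldl
    (fun branches event =>
      let branch_name := pvBranchName event
      let branches :=
        if branches.contains branch_name then branches
        else branches.insert branch_name []
      branches.modify branch_name [] (fun l => l ++ [event]))
    PySem.Dict.empty).items

-- ===== PORT B =====
def group_events_by_branch_py_alt (events : List (List (String × List (String × String)))) : List (String × List (List (String × List (String × String)))) :=
  (PySem.List.dedup (events.map pvBranchName)).map
    (fun name => (name, events.filter (fun e => pvBranchName e == name)))

-- ===== PRECONDITION & SPEC =====
def Spec_group_events_by_branch_py (events : List (List (String × List (String × String)))) (out : List (String × List (List (String × List (String × String))))) : Prop := out = group_events_by_branch_py_alt events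
instance (events : List (List (String × List (String × String)))) (out : List (String × List (List (String × List (String × String))))) : Decidable (Spec_group_events_by_branch_py events out) := by
  unfold Spec_group_events_by_branch_py
  exact @instDecidableEqList _ instDecidableEqProd out (group_events_by_branch_py_alt events)

-- ===== CLAIM (what is proved, stated in full; the proofs are below) =====
def Claim_equal_group_events_by_branch_py : Prop := ∀ (events : List (List (String × List (String × String)))), Dom_group_events_by_branch_py events → Spec_group_events_by_branch_py events (group_events_by_branch_py events)

-- ===== LEMMAS AND PROOFS =====

def pvGroup (xs : List (List (String × List (String × String)))) : List (String × List (List (String × List (String × String)))) :=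
  (PySem.List.dedup (xs.map pvBranchName)).map
    (fun k => (k, xs.filter (fun e => pvBranchName e == k)))

theorem pv_find_beq (xs : List String) (x : String) (h : x ∈ xs) : List.find? (fun a => a == x) xs = some x := by
  induction xs with
  | nil => simp at h
  | cons a as ih =>
    by_cases hax : a = x
    · simp [hax]
    · have hne : (a == x) = false := by simp [hax]
      have hm : x ∈ as := by
        rcases List.mem_cons.mp h with h1 | h1
        · exact absurd h1.symm hax
        · exact h1
      simp [hne, ih hm]

theorem pv_dedup_append (xs : List String) (x : String) :
    PySem.List.dedup (xs ++ [x]) =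
      if x ∈ xs then PySem.List.dedup xs else PySem.List.dedup xs ++ [x] := by
  simp only [PySem.List.dedup_eq_ofList, PySem.Set.ofList_append_singleton, PySem.Set.add]
  by_cases h : x ∈ xs
  · have : PySem.Set.contains (PySem.Set.ofList xs) x = true := by
      simp [PySem.Set.contains, PySem.Set.mem_ofList, h]
    simp [h]
  · have : PySem.Set.contains (PySem.Set.ofList xs) x = false := by
      simp [PySem.Set.contains, PySem.Set.mem_ofList, h]
    simp

theorem pv_step (xs : List (List (String × List (String × String))))
    (x : List (String × List (String × String))) :
    (let branch_name := pvBranchName x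
     let branches :=
       if (PySem.Dict.mk (pvGroup xs)).contains branch_name then PySem.Dict.mk (pvGroup xs)
       else (PySem.Dict.mk (pvGroup xs)).insert branch_name []
     branches.modify branch_name [] (fun l => l ++ [x])) = PySem.Dict.mk (pvGroup (xs ++ [x])) := by
  set k0 := pvBranchName x with hk0
  set ks := xs.map pvBranchName with hks
  have hGkeys : ∀ p ∈ pvGroup xs, p.1 ∈ PySem.List.dedup ks := by
    intro p hp
    simp only [pvGroup, List.mem_map] at hp
    obtain ⟨k, hk, rfl⟩ := hp
    exact hk
  have hfilter_app : ∀ k : String, (xs ++ [x]).filter (fun e => pvBranchName e == k)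
      = xs.filter (fun e => pvBranchName e == k) ++ (if k0 = k then [x] else []) := by
    intro k
    rw [List.filter_append, hk0]
    by_cases h : pvBranchName x = k <;> simp [h]
  by_cases h : k0 ∈ ks
  · -- contains is true
    have hcont : (PySem.Dict.mk (pvGroup xs)).contains k0 = true := by
      have hmem : k0 ∈ PySem.List.dedup ks := (PySem.List.mem_dedup _ _).mpr h
      simp only [PySem.Dict.contains, pvGroup, List.any_map, List.any_eq_true]
      exact ⟨k0, hmem, by simp⟩
    have hget : (PySem.Dict.mk (pvGroup xs)).getD k0 [] = xs.filter (fun e => pvBranchName e == k0) := by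
      simp only [PySem.Dict.getD, PySem.Dict.get?, pvGroup]
      rw [List.find?_map]
      have : List.find? ((fun p => p.1 == k0) ∘ (fun k => (k, xs.filter (fun e => pvBranchName e == k)))) (PySem.List.dedup ks)
          = List.find? (fun a => a == k0) (PySem.List.dedup ks) := by
        rfl
      rw [this, pv_find_beq _ _ (by simpa [PySem.List.mem_dedup] using h)]
      rfl
    simp only [hcont, if_pos, PySem.Dict.modify, hget]
    -- insert with contains true
    have : (PySem.Dict.mk (pvGroup xs)).insert k0 (xs.filter (fun e => pvBranchName e == k0) ++ [x])
        = PySem.Dict.mk (pvGroup (xs ++ [x])) := by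
      simp only [PySem.Dict.insert, hcont, if_pos]
      congr 1
      simp only [pvGroup, List.map_map, List.map_append, List.map_cons, List.map_nil, hfilter_app]
      rw [← hk0, pv_dedup_append]
      simp only [hks] at h ⊢
      rw [if_pos h]
      apply List.map_congr_left
      intro k hk
      by_cases hkk : k = k0
      · subst hkk; simp
      · have hbk : (k == k0) = false := by simp [hkk]
        simp [Function.comp, hbk, Ne.symm hkk]
    simpa using this
  · -- contains is false
    have hcont : (PySem.Dict.mk (pvGroup xs)).contains k0 = false := by
      simp only [PySem.Dict.contains, pvGroup, List.any_map]
      simp only [List.any_eq_false, Function.comp]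
      intro k hkd
      have hm : k ∈ ks := (PySem.List.mem_dedup _ _).mp hkd
      have hne : ¬ k = k0 := fun hh => h (hh ▸ hm)
      simp [hne]
    have hnone : List.find? (fun p => p.1 == k0) (pvGroup xs) = none := by
      apply List.find?_eq_none.mpr
      intro p hp
      have hm : p.1 ∈ ks := (PySem.List.mem_dedup _ _).mp (hGkeys p hp)
      have hne : ¬ p.1 = k0 := fun hh => h (hh ▸ hm)
      simp [hne]
    have hxs_nok0 : xs.filter (fun e => pvBranchName e == k0) = [] := by
      apply List.filter_eq_nil_iff.mpr
      intro e he
      have hm : pvBranchName e ∈ ks := List.mem_map_of_mem he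
      have hne : ¬ pvBranchName e = k0 := fun hh => h (hh ▸ hm)
      simp [hne]
    simp only [hcont, Bool.false_eq_true, if_false, PySem.Dict.modify]
    -- d1 = insert k0 [] appends
    have hd1 : (PySem.Dict.mk (pvGroup xs)).insert k0 []
        = PySem.Dict.mk (pvGroup xs ++ [(k0, [])]) := by
      simp [PySem.Dict.insert, hcont]
    rw [hd1]
    have hget1 : (PySem.Dict.mk (pvGroup xs ++ [(k0, [])])).getD k0 [] = [] := by
      simp only [PySem.Dict.getD, PySem.Dict.get?]
      rw [List.find?_append, hnone]
      simp
    rw [hget1]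
    have hcont1 : (PySem.Dict.mk (pvGroup xs ++ [(k0, [])])).contains k0 = true := by
      simp [PySem.Dict.contains]
    simp only [PySem.Dict.insert, hcont1, if_pos]
    congr 1
    rw [List.map_append]
    have hrepl : ∀ p ∈ pvGroup xs, (if (p.1 == k0) = true then (k0, ([] : List (List (String × List (String × String)))) ++ [x]) else p) = p := by
      intro p hp
      have hm : p.1 ∈ ks := by simpa [PySem.List.mem_dedup] using hGkeys p hp
      have : (p.1 == k0) = false := by
        simp only [beq_eq_false_iff_ne, ne_eq]
        intro hkE; exact h (hkE ▸ hm)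
      simp [this]
    rw [List.map_congr_left hrepl]
    simp only [List.map_id']
    simp only [pvGroup, List.map_append, List.map_cons, List.map_nil, hfilter_app]
    rw [← hk0, pv_dedup_append]
    simp only [hks] at h ⊢
    rw [if_neg h]
    rw [List.map_append]
    congr 1
    · apply List.map_congr_left
      intro k hk
      have hm : k ∈ ks := (PySem.List.mem_dedup _ _).mp hk
      have : k0 ≠ k := fun hh => h (hh ▸ hm)
      simp [this]
    · simp [hxs_nok0]

theorem pv_fold (xs : List (List (String × List (String × String)))) :
    xs.foldl
      (fun branches event =>
        let branch_name := pvBranchName event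
        let branches :=
          if branches.contains branch_name then branches
          else branches.insert branch_name []
        branches.modify branch_name [] (fun l => l ++ [event]))
      PySem.Dict.empty = PySem.Dict.mk (pvGroup xs) := by
  induction xs using List.reverseRecOn with
  | nil => rfl
  | append_singleton xs x ih =>
      rw [List.foldl_append, ih, List.foldl_cons, List.foldl_nil, pv_step]

-- ===== VERDICT (by name: the statement is the Claim_ definition above) =====
theorem group_events_by_branch_py_spec : Claim_equal_group_events_by_branch_py := by
  intro events _
  show _ = _
  unfold group_events_by_branch_py group_events_by_branch_py_alt
  rw [pv_fold]
  rfl
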